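-- pv_equiv track=rewrite | github.com/rasheibani/Landmark_Placement | V3.py | check_if_the_node_is_uncertain
-- ===== SOURCE A (Python) =====
-- from collections import Counter
--
-- def nearest_quarter(ang):
--     ang = ang % 360
--     return (ang // 90) * 90
--
-- def calculate_edge_angles(bearings_sorted):
--     num_edges = len(bearings_sorted)
--     angles = []
--     for i in range(num_edges):
--         next_index = (i + 1) % num_edges
--         angle = (bearings_sorted[next_index] - bearings_sorted[i] + 360) % 360
--         angles.append(angle)
--     return angles
--
-- def check_if_the_node_is_uncertain(bearings_sorted):
--     angles_between_edges = calculate_edge_angles(bearings_sorted)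
--     for bearingss in bearings_sorted:
--         angles_relative = [- bearingss + angle for angle in bearings_sorted]
--         angles_relative = [angle % 360 for angle in angles_relative]
--         nearest_quarters = [nearest_quarter(angle) for angle in angles_relative]
--         if max(Counter(nearest_quarters).values()) >= 2 and len(bearings_sorted) > 1:
--             return True
--     return False
-- ===== SOURCE B (Python) =====
-- def check_if_the_node_is_uncertain(bearings_sorted):
--     n = len(bearings_sorted)
--     if n >= 5:
--         # five bearings occupy at most four 90-degree quadrants (relative to the
--         # first bearing), so by pigeonhole two of them lie within 90 degrees
--         return True
--     return any((bearings_sorted[j] - bearings_sorted[i]) % 360 < 90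
--                for i in range(n) for j in range(n) if i != j)
-- ===== Notes on version B (the rewrite author's own statement) =====
-- stated objective: faster
-- what changed: B returns True immediately when there are at least 5 bearings (pigeonhole: five bearings cannot occupy four 90-degree quadrants without two sharing one) and otherwise tests the modular gap (xs[j]-xs[i]) % 360 < 90 over the ordered pairs of the at most 4 elements, replacing A's per-pivot quadrant Counter scan.
import Mathlib
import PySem

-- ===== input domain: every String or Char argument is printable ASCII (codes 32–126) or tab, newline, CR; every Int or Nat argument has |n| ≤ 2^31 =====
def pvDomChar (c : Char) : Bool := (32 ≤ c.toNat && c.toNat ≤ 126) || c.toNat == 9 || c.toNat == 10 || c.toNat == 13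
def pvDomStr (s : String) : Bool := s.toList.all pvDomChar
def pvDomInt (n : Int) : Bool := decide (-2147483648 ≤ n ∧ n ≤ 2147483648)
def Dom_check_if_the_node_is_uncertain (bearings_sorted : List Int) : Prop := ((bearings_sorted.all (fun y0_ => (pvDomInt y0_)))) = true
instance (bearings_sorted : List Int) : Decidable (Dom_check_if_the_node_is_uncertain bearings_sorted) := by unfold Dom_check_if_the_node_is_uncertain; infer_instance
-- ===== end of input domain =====

-- B replaces A's per-pivot quadrant-Counter scan by a constant-time pigeonhole answer for
-- lists of ≥ 5 bearings and a direct modular-gap test on the ≤ 4 remaining pairs (objective: faster).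

-- ===== PORT A =====
-- helper nearest_quarter
def pvNearestQuarter (ang : Int) : Int :=
  let ang2 := PySem.Int.mod ang 360
  (PySem.Int.floordiv ang2 90) * 90

-- helper calculate_edge_angles (its result is computed and then discarded by A, as in the Python);
-- the indices i and (i+1) % num_edges are always in range, so the pyGetD default 0 is never used
def pvCalculateEdgeAngles (bearings_sorted : List Int) : List Int :=
  let num_edges : Int := bearings_sorted.length
  (PySem.List.pyRange 0 num_edges 1).foldl (fun angles i =>
    let next_index := PySem.Int.mod (i + 1) num_edges
    let angle := PySem.Int.mod (PySem.List.pyGetD bearings_sorted next_index 0 -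
      PySem.List.pyGetD bearings_sorted i 0 + 360) 360
    angles ++ [angle]) []

-- the 'for bearingss in bearings_sorted' loop; the `none` branch (Python: max() of an empty
-- Counter would raise ValueError) is unreachable, since the loop body only runs when
-- bearings_sorted is nonempty, making the Counter nonempty
def pvUncertainLoop (bearings_sorted : List Int) : List Int → Bool
  | [] => false
  | bearingss :: rest =>
      let angles_relative := bearings_sorted.map (fun angle => - bearingss + angle)
      let angles_relative2 := angles_relative.map (fun angle => PySem.Int.mod angle 360)
      let nearest_quarters := angles_relative2.map (fun angle => pvNearestQuarter angle)
      match PySem.List.max? (PySem.Dict.counter nearest_quarters).values (fun v => v) with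
      | some m => if 2 ≤ m ∧ 1 < (bearings_sorted.length : Int) then true
                  else pvUncertainLoop bearings_sorted rest
      | none => pvUncertainLoop bearings_sorted rest

def check_if_the_node_is_uncertain (bearings_sorted : List Int) : Bool :=
  let _angles_between_edges := pvCalculateEdgeAngles bearings_sorted
  pvUncertainLoop bearings_sorted bearings_sorted

-- ===== PORT B =====
def check_if_the_node_is_uncertain_alt (bearings_sorted : List Int) : Bool :=
  let n : Int := bearings_sorted.length
  if 5 ≤ n then true
  else (PySem.List.pyRange 0 n 1).any (fun i =>
    (PySem.List.pyRange 0 n 1).any (fun j =>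
      decide (i ≠ j) && decide (PySem.Int.mod (PySem.List.pyGetD bearings_sorted j 0 -
        PySem.List.pyGetD bearings_sorted i 0) 360 < 90)))

-- ===== PRECONDITION & SPEC =====
def Spec_check_if_the_node_is_uncertain (bearings_sorted : List Int) (out : Bool) : Prop := out = check_if_the_node_is_uncertain_alt bearings_sorted
instance (bearings_sorted : List Int) (out : Bool) : Decidable (Spec_check_if_the_node_is_uncertain bearings_sorted out) := by unfold Spec_check_if_the_node_is_uncertain; infer_instance

-- ===== CLAIM (what is proved, stated in full; the proofs are below) =====
def Claim_equal_check_if_the_node_is_uncertain : Prop := ∀ (bearings_sorted : List Int), Dom_check_if_the_node_is_uncertain bearings_sorted → Spec_check_if_the_node_is_uncertain bearings_sorted (check_if_the_node_is_uncertain bearings_sorted)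

-- ===== LEMMAS AND PROOFS =====

-- two bearings at distinct positions lie (cyclically) within 90° of each other
def pvClose (xs : List Int) : Prop :=
  ∃ (i j : Nat) (hi : i < xs.length) (hj : j < xs.length),
    i ≠ j ∧ (xs[j] - xs[i]) % 360 < 90

-- the list of relative quadrants A computes for a pivot b
def pvQuarters (xs : List Int) (b : Int) : List Int :=
  xs.map (fun a => pvNearestQuarter (PySem.Int.mod (-b + a) 360))

theorem pvQuarters_getElem (xs : List Int) (b : Int) (k : Nat) (hk : k < xs.length) :
    (pvQuarters xs b)[k]'(by simpa [pvQuarters] using hk) =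
      (((-b + xs[k]) % 360) / 90) * 90 := by
  simp only [pvQuarters, List.getElem_map, pvNearestQuarter]
  rw [PySem.Int.mod_eq_emod_of_pos (by norm_num), PySem.Int.mod_eq_emod_of_pos (by norm_num),
    PySem.Int.floordiv_eq_ediv_of_pos (by norm_num), Int.emod_emod_of_dvd _ dvd_rfl]

-- B char
theorem pvAlt_eq_true_iff (xs : List Int) :
    check_if_the_node_is_uncertain_alt xs = true ↔ 5 ≤ xs.length ∨ pvClose xs := by
  simp only [check_if_the_node_is_uncertain_alt]
  split_ifs with h5
  · simp only [true_iff]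
    exact Or.inl (by exact_mod_cast h5)
  · constructor
    · intro h
      rw [List.any_eq_true] at h
      obtain ⟨i, hi, hpi⟩ := h
      rw [List.any_eq_true] at hpi
      obtain ⟨j, hj, hp⟩ := hpi
      rw [PySem.List.mem_pyRange_one] at hi hj
      simp only [Bool.and_eq_true, decide_eq_true_eq] at hp
      obtain ⟨hne, hlt⟩ := hp
      obtain ⟨k, rfl⟩ : ∃ k : Nat, i = (k : Int) := ⟨i.toNat, by omega⟩
      obtain ⟨k', rfl⟩ : ∃ k' : Nat, j = (k' : Int) := ⟨j.toNat, by omega⟩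
      have hk : k < xs.length := by exact_mod_cast hi.2
      have hk' : k' < xs.length := by exact_mod_cast hj.2
      right
      refine ⟨k, k', hk, hk', by exact_mod_cast hne, ?_⟩
      rw [PySem.Int.mod_eq_emod_of_pos (by norm_num), PySem.List.pyGetD_natCast,
        PySem.List.pyGetD_natCast, List.getD_eq_getElem _ _ hk, List.getD_eq_getElem _ _ hk'] at hlt
      exact hlt
    · rintro (h5c | ⟨i, j, hi, hj, hne, hlt⟩)
      · exact absurd (by exact_mod_cast h5c) h5
      · rw [List.any_eq_true]
        refine ⟨(i : Int), by rw [PySem.List.mem_pyRange_one]; constructor <;> omega, ?_⟩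
        rw [List.any_eq_true]
        refine ⟨(j : Int), by rw [PySem.List.mem_pyRange_one]; constructor <;> omega, ?_⟩
        simp only [Bool.and_eq_true, decide_eq_true_eq]
        refine ⟨by exact_mod_cast hne, ?_⟩
        rw [PySem.Int.mod_eq_emod_of_pos (by norm_num), PySem.List.pyGetD_natCast,
          PySem.List.pyGetD_natCast, List.getD_eq_getElem _ _ hj, List.getD_eq_getElem _ _ hi]
        exact hlt

-- Counter(qs).values() lists the count of each distinct element of qs
theorem pvCounterValues (qs : List Int) :
    (PySem.Dict.counter qs).values = (PySem.Set.ofList qs).map (fun k => (qs.count k : Int)) := by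
  simp only [PySem.Dict.values, PySem.Dict.items_counter, List.map_map]
  rfl

-- Counter/max: the max of Counter(qs).values() is ≥ 2 iff qs has a repeated element
theorem pvCounterMax (qs : List Int) :
    (∃ m, PySem.List.max? (PySem.Dict.counter qs).values (fun v => v) = some m ∧ 2 ≤ m)
      ↔ ¬ qs.Nodup := by
  constructor
  · rintro ⟨m, hm, h2⟩
    have hmem := PySem.List.max?_mem hm
    rw [pvCounterValues, List.mem_map] at hmem
    obtain ⟨k, hk, rfl⟩ := hmem
    rw [List.nodup_iff_count_le_one]
    push Not
    exact ⟨k, by exact_mod_cast h2⟩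
  · intro hnd
    rw [List.nodup_iff_count_le_one] at hnd
    push Not at hnd
    obtain ⟨k, hk⟩ := hnd
    have hkmem : k ∈ qs := by
      rw [← List.count_pos_iff]
      omega
    have hval : ((qs.count k : Int)) ∈ (PySem.Dict.counter qs).values := by
      rw [pvCounterValues, List.mem_map]
      exact ⟨k, (PySem.Set.mem_ofList _ _).mpr hkmem, rfl⟩
    cases hmax : PySem.List.max? (PySem.Dict.counter qs).values (fun v => v) with
    | none =>
      rw [PySem.List.max?_eq_none_iff] at hmax
      rw [hmax] at hval
      simp at hval
    | some m =>
      refine ⟨m, rfl, ?_⟩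
      have := PySem.List.max?_isMax hmax _ hval
      have h2 : (2 : Int) ≤ (qs.count k : Int) := by exact_mod_cast hk
      exact le_trans h2 this

-- loop char
theorem pvUncertainLoop_eq_true_iff (xs : List Int) (l : List Int) :
    pvUncertainLoop xs l = true ↔
      ∃ b ∈ l, ¬ (pvQuarters xs b).Nodup ∧ 1 < xs.length := by
  induction l with
  | nil => simp [pvUncertainLoop]
  | cons b rest ih =>
    have hq : ((xs.map (fun angle => - b + angle)).map (fun angle => PySem.Int.mod angle 360)).map
        (fun angle => pvNearestQuarter angle) = pvQuarters xs b := by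
      simp [pvQuarters, List.map_map, Function.comp]
    rw [pvUncertainLoop]
    simp only [hq]
    cases hmax : PySem.List.max? (PySem.Dict.counter (pvQuarters xs b)).values (fun v => v) with
    | none =>
      have hqnil : pvQuarters xs b = [] := by
        rw [PySem.List.max?_eq_none_iff, pvCounterValues, List.map_eq_nil_iff] at hmax
        by_contra hne
        obtain ⟨q, hqmem⟩ := List.exists_mem_of_ne_nil _ hne
        have : q ∈ PySem.Set.ofList (pvQuarters xs b) := (PySem.Set.mem_ofList _ _).mpr hqmem
        rw [hmax] at this
        simp at this
      have hxnil : xs = [] := by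
        have := congrArg List.length hqnil
        simpa [pvQuarters] using this
      simp only [ih, List.mem_cons]
      constructor
      · rintro ⟨b', hb', h⟩
        exact ⟨b', Or.inr hb', h⟩
      · rintro ⟨b', hb' | hb', h⟩
        · exact absurd h.2 (by simp [hxnil])
        · exact ⟨b', hb', h⟩
    | some m =>
      show (if 2 ≤ m ∧ 1 < (xs.length : Int) then true else pvUncertainLoop xs rest) = true ↔ _
      split_ifs with hc
      · simp only [true_iff]
        refine ⟨b, List.mem_cons_self, ?_, by exact_mod_cast hc.2⟩
        exact (pvCounterMax _).mp ⟨m, hmax, hc.1⟩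
      · rw [ih]
        constructor
        · rintro ⟨b', hb', h⟩
          exact ⟨b', List.mem_cons_of_mem _ hb', h⟩
        · rintro ⟨b', hb', h⟩
          rcases List.mem_cons.mp hb' with rfl | hb''
          · exfalso
            obtain ⟨m', hm', h2'⟩ := (pvCounterMax _).mpr h.1
            rw [hmax] at hm'
            have hmm : m = m' := Option.some.inj hm'
            have hlen : (1 : Int) < (xs.length : Int) := by exact_mod_cast h.2
            exact hc ⟨hmm ▸ h2', hlen⟩
          · exact ⟨b', hb'', h⟩

-- a repeated relative quadrant (any pivot) yields a close pair
theorem pvClose_of_quarters (xs : List Int) (b : Int) (h : ¬ (pvQuarters xs b).Nodup) :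
    pvClose xs := by
  rw [List.Nodup, List.pairwise_iff_getElem] at h
  push Not at h
  obtain ⟨i, j, hi, hj, hij, heq⟩ := h
  have hi' : i < xs.length := by simpa [pvQuarters] using hi
  have hj' : j < xs.length := by simpa [pvQuarters] using hj
  rw [pvQuarters_getElem xs b i hi', pvQuarters_getElem xs b j hj'] at heq
  have key : ((xs[j]'hj' - xs[i]'hi') % 360 < 90) ∨ ((xs[i]'hi' - xs[j]'hj') % 360 < 90) := by
    omega
  rcases key with hk | hk
  · exact ⟨i, j, hi', hj', by omega, hk⟩
  · exact ⟨j, i, hj', hi', by omega, hk⟩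

-- a close pair yields a repeated relative quadrant for the pivot xs[i]
theorem pvQuarters_of_close (xs : List Int) (h : pvClose xs) :
    ∃ b ∈ xs, ¬ (pvQuarters xs b).Nodup := by
  obtain ⟨i, j, hi, hj, hne, hlt⟩ := h
  refine ⟨xs[i], List.getElem_mem _, ?_⟩
  intro hnodup
  have hlen : (pvQuarters xs (xs[i])).length = xs.length := by simp [pvQuarters]
  have h1 := pvQuarters_getElem xs (xs[i]) i hi
  have h2 := pvQuarters_getElem xs (xs[i]) j hj
  have heq : (pvQuarters xs (xs[i]))[i]'(by omega) = (pvQuarters xs (xs[i]))[j]'(by omega) := by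
    rw [h1, h2]
    omega
  exact hne (hnodup.getElem_inj_iff.mp heq)

-- pigeonhole: with ≥ 5 bearings, two always share a quadrant
theorem pvClose_of_five (xs : List Int) (h : 5 ≤ xs.length) : pvClose xs := by
  apply pvClose_of_quarters xs 0
  intro hnd
  have hsub : pvQuarters xs 0 ⊆ [0, 90, 180, 270] := by
    intro q hq
    rw [pvQuarters, List.mem_map] at hq
    obtain ⟨a, _, rfl⟩ := hq
    have hvals : pvNearestQuarter (PySem.Int.mod (-0 + a) 360) = 0 ∨
        pvNearestQuarter (PySem.Int.mod (-0 + a) 360) = 90 ∨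
        pvNearestQuarter (PySem.Int.mod (-0 + a) 360) = 180 ∨
        pvNearestQuarter (PySem.Int.mod (-0 + a) 360) = 270 := by
      simp only [pvNearestQuarter]
      rw [PySem.Int.mod_eq_emod_of_pos (by norm_num), PySem.Int.mod_eq_emod_of_pos (by norm_num),
        PySem.Int.floordiv_eq_ediv_of_pos (by norm_num)]
      omega
    simp only [List.mem_cons]
    tauto
  have hle := (List.subperm_of_subset hnd hsub).length_le
  simp [pvQuarters] at hle
  omega

-- A char
theorem pvA_eq_true_iff (xs : List Int) :
    check_if_the_node_is_uncertain xs = true ↔ pvClose xs := by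
  simp only [check_if_the_node_is_uncertain]
  rw [pvUncertainLoop_eq_true_iff]
  constructor
  · rintro ⟨b, hb, hnd, _⟩
    exact pvClose_of_quarters xs b hnd
  · intro h
    obtain ⟨b, hb, hnd⟩ := pvQuarters_of_close xs h
    refine ⟨b, hb, hnd, ?_⟩
    obtain ⟨i, j, hi, hj, hne, _⟩ := h
    omega

-- ===== VERDICT (by name: the statement is the Claim_ definition above) =====
theorem check_if_the_node_is_uncertain_spec : Claim_equal_check_if_the_node_is_uncertain := by
  intro xs _
  unfold Spec_check_if_the_node_is_uncertain
  rw [Bool.eq_iff_iff, pvA_eq_true_iff, pvAlt_eq_true_iff]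
  constructor
  · exact Or.inr
  · rintro (h5 | h); · exact pvClose_of_five xs h5
    · exact h
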